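-- pv_equiv track=rewrite | github.com/muxamadsodiq/new-raudiy | quiz.py | find_double_vowel_words
-- ===== SOURCE A (Python) =====
-- VOWELS = set("aeiou")
--
-- def find_double_vowel_words(words):
--     matches = {}
--     for word in words:
--         previous = ""
--         for char in word.lower():
--             if char == previous and char in VOWELS:
--                 matches[word] = char
--                 break
--             previous = char
--     return matches
-- ===== SOURCE B (Python) =====
-- def find_double_vowel_words(words):
--     matches = {}
--     for word in words:
--         lw = word.lower()
--         best = None
--         for v in "aeiou":
--             i = lw.find(v + v)
--             if i != -1 and (best is None or i < best[0]):
--                 best = (i, v)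
--         if best is not None:
--             matches[word] = best[1]
--     return matches
-- ===== Notes on version B (the rewrite author's own statement) =====
-- stated objective: alternative
-- what changed: Instead of scanning each word character by character with a previous-char state machine, B runs five substring searches (str.find of 'aa','ee','ii','oo','uu' on the lowercased word) and keeps the hit with the smallest index, whose vowel is the stored value.
import Mathlib
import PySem

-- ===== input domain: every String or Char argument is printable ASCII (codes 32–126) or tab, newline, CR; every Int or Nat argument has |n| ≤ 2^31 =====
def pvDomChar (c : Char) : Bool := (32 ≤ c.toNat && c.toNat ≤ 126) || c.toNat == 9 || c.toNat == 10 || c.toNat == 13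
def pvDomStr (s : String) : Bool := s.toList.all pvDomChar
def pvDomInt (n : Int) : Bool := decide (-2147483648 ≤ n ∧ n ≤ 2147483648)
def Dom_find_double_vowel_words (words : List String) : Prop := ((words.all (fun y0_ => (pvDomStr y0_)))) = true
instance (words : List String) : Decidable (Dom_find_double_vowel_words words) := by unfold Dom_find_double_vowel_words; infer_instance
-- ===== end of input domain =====

-- B: alternative algorithm — five substring searches (find of "aa".."uu" on the lowercased word) keeping the smallest hit index, instead of A's previous-char state-machine scan; same asymptotic cost.


-- ===== PORT A =====
-- set("aeiou")
def pvVowels : List Char := ['a','e','i','o','u']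

-- A's inner loop: previous starts as "" (never equal to a char) -> modelled as Option Char 'none'
def pvAInner : List Char → Option Char → Option Char
  | [], _ => none
  | c :: rest, prev =>
      if (some c == prev) && pvVowels.contains c then some c
      else pvAInner rest (some c)

def find_double_vowel_words (words : List String) : List (String × String) :=
  (words.foldl (fun d w =>
      match pvAInner (PySem.Str.lower w).toList none with
      | some c => d.insert w (String.ofList [c])
      | none => d)
    (PySem.Dict.empty : PySem.Dict String String)).items

-- ===== PORT B =====
-- B's inner loop over the five vowels: i = lw.find(v+v); keep the hit with the smallest index
def pvBBest (lw : List Char) : Option (Int × Char) :=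
  ['a','e','i','o','u'].foldl (fun best v =>
    let i := PySem.Chars.find lw [v, v]
    if i = -1 then best
    else match best with
         | none => some (i, v)
         | some b => if i < b.1 then some (i, v) else best) none

def find_double_vowel_words_alt (words : List String) : List (String × String) :=
  (words.foldl (fun d w =>
      match pvBBest (PySem.Str.lower w).toList with
      | some b => d.insert w (String.ofList [b.2])
      | none => d)
    (PySem.Dict.empty : PySem.Dict String String)).items

-- ===== PRECONDITION & SPEC =====
def Spec_find_double_vowel_words (words : List String) (out : List (String × String)) : Prop := out = find_double_vowel_words_alt words
instance (words : List String) (out : List (String × String)) : Decidable (Spec_find_double_vowel_words words out) := by unfold Spec_find_double_vowel_words; infer_instance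

-- ===== CLAIM (what is proved, stated in full; the proofs are below) =====
def Claim_equal_find_double_vowel_words : Prop := ∀ (words : List String), Dom_find_double_vowel_words words → Spec_find_double_vowel_words words (find_double_vowel_words words)

-- ===== LEMMAS AND PROOFS =====

-- proof-side helper: the first adjacent equal vowel pair, as a find? over zipped neighbours
def pvFirstDouble (cs : List Char) : Option Char :=
  ((cs.zip cs.tail).find? (fun p => p.1 == p.2 && pvVowels.contains p.1)).map Prod.fst

lemma aInner_some (cs : List Char) (c : Char) :
    pvAInner cs (some c)
      = (((c :: cs).zip cs).find? (fun p => p.1 == p.2 && pvVowels.contains p.1)).map Prod.fst := by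
  induction cs generalizing c with
  | nil => simp [pvAInner]
  | cons d rest ih =>
      by_cases h : c = d
      · subst h
        by_cases hv : c ∈ pvVowels
        · simp [pvAInner, hv]
        · simp [pvAInner, hv, ih]
      · have h1 : (d == c) = false := by simp [(· == ·)]; exact fun e => h e.symm
        have h2 : (c == d) = false := by simp [h]
        simp [pvAInner, h1, h2, ih]

lemma aInner_none (cs : List Char) : pvAInner cs none = pvFirstDouble cs := by
  cases cs with
  | nil => simp [pvAInner, pvFirstDouble]
  | cons c rest =>
      have : pvAInner (c :: rest) none = pvAInner rest (some c) := by
        simp [pvAInner]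
      rw [this, aInner_some]
      simp [pvFirstDouble]


-- [v,v] is a prefix of lw.drop j iff positions j, j+1 hold v
lemma db_prefix_iff (lw : List Char) (v : Char) (j : Nat) :
    [v, v] <+: lw.drop j ↔ ∃ h : j + 1 < lw.length, lw[j] = v ∧ lw[j+1] = v := by
  constructor
  · intro hp
    obtain ⟨t, ht⟩ := hp
    have e : lw.drop j = v :: v :: t := ht.symm
    have hlen : lw.length - j = t.length + 2 := by
      have := congrArg List.length e
      simpa using this
    have hj : j + 1 < lw.length := by omega
    refine ⟨hj, ?_, ?_⟩
    · have h0 : (lw.drop j)[0]'(by simp [e]) = v := by simp [e]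
      rwa [List.getElem_drop] at h0
    · have h1 : (lw.drop j)[1]'(by simp [e]) = v := by simp [e]
      rwa [List.getElem_drop] at h1
  · rintro ⟨h, h1, h2⟩
    have d1 : lw.drop j = lw[j] :: lw.drop (j+1) := List.drop_eq_getElem_cons (by omega)
    have d2 : lw.drop (j+1) = lw[j+1] :: lw.drop (j+2) := List.drop_eq_getElem_cons h
    rw [d1, d2, h1, h2]
    exact ⟨lw.drop (j+2), rfl⟩

-- the spec of find at start 0: nonnegative, a hit, and minimal
lemma find_spec (lw sub : List Char) (h : PySem.Chars.find lw sub ≠ -1) :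
    0 ≤ PySem.Chars.find lw sub ∧ sub <+: lw.drop (PySem.Chars.find lw sub).toNat ∧
      ∀ i : Nat, i < (PySem.Chars.find lw sub).toNat → ¬ sub <+: lw.drop i := by
  have h0 := PySem.Chars.findFrom_natCast_spec lw sub 0 (Nat.zero_le _)
  rw [Nat.cast_zero, PySem.Chars.findFrom_zero] at h0
  have hh := h0 h
  exact ⟨hh.1, hh.2.1, fun i hi => hh.2.2 i (Nat.zero_le _) hi⟩

-- any hit position bounds find from above
lemma find_le (lw sub : List Char) (j : Nat) (h : sub <+: lw.drop j) :
    PySem.Chars.find lw sub ≠ -1 ∧ PySem.Chars.find lw sub ≤ (j : Int) := by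
  have hinf : sub <:+: lw := h.isInfix.trans (List.drop_suffix j lw).isInfix
  have hne : PySem.Chars.find lw sub ≠ -1 := by
    rw [Ne, PySem.Chars.find_eq_neg_one_iff]
    exact fun hf => hf hinf
  obtain ⟨hpos, _, hmin⟩ := find_spec lw sub hne
  refine ⟨hne, ?_⟩
  by_contra hgt
  push_neg at hgt
  have hj : j < (PySem.Chars.find lw sub).toNat := by omega
  exact hmin j hj h

-- invariant for B's fold over the vowel list
def GoodB (lw : List Char) (vs : List Char) : Option (Int × Char) → Prop
  | none => ∀ v ∈ vs, PySem.Chars.find lw [v, v] = -1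
  | some b => b.2 ∈ vs ∧ PySem.Chars.find lw [b.2, b.2] = b.1 ∧ b.1 ≠ -1 ∧
      ∀ v ∈ vs, PySem.Chars.find lw [v, v] = -1 ∨ b.1 ≤ PySem.Chars.find lw [v, v]

-- proof-side name for B's loop body (definitionally the fold function in pvBBest)
def pvStep (lw : List Char) (best : Option (Int × Char)) (v : Char) : Option (Int × Char) :=
  let i := PySem.Chars.find lw [v, v]
  if i = -1 then best
  else match best with
       | none => some (i, v)
       | some b => if i < b.1 then some (i, v) else best

lemma pvBBest_eq (lw : List Char) :
    pvBBest lw = (['a','e','i','o','u'] : List Char).foldl (pvStep lw) none := rfl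

lemma good_step (lw : List Char) (done : List Char) (acc : Option (Int × Char)) (v : Char)
    (h : GoodB lw done acc) : GoodB lw (done ++ [v]) (pvStep lw acc v) := by
  by_cases hi : PySem.Chars.find lw [v, v] = -1
  · have e : pvStep lw acc v = acc := by
      cases acc <;> simp [pvStep, hi]
    rw [e]
    cases acc with
    | none =>
        intro w hw
        rcases List.mem_append.1 hw with hw | hw
        · exact h w hw
        · simp at hw; subst hw; exact hi
    | some b =>
        obtain ⟨hm, hf, hn, hall⟩ := h
        refine ⟨List.mem_append_left _ hm, hf, hn, ?_⟩
        intro w hw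
        rcases List.mem_append.1 hw with hw | hw
        · exact hall w hw
        · simp at hw; subst hw; exact Or.inl hi
  · cases acc with
    | none =>
        have e : pvStep lw none v = some (PySem.Chars.find lw [v, v], v) := by
          simp [pvStep, hi]
        rw [e]
        refine ⟨List.mem_append_right _ (by simp), rfl, hi, ?_⟩
        intro w hw
        rcases List.mem_append.1 hw with hw | hw
        · exact Or.inl (h w hw)
        · simp at hw; subst hw; exact Or.inr le_rfl
    | some b =>
        obtain ⟨hm, hf, hn, hall⟩ := h
        by_cases hlt : PySem.Chars.find lw [v, v] < b.1
        · have e : pvStep lw (some b) v = some (PySem.Chars.find lw [v, v], v) := by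
            simp [pvStep, hi, hlt]
          rw [e]
          refine ⟨List.mem_append_right _ (by simp), rfl, hi, ?_⟩
          intro w hw
          rcases List.mem_append.1 hw with hw | hw
          · rcases hall w hw with h1 | h1
            · exact Or.inl h1
            · exact Or.inr (le_trans (le_of_lt hlt) h1)
          · simp at hw; subst hw; exact Or.inr le_rfl
        · have e : pvStep lw (some b) v = some b := by
            simp [pvStep, hi, hlt]
          rw [e]
          refine ⟨List.mem_append_left _ hm, hf, hn, ?_⟩
          intro w hw
          rcases List.mem_append.1 hw with hw | hw
          · exact hall w hw
          · simp at hw; subst hw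
            exact Or.inr (by omega)

lemma fold_good (lw : List Char) (vs : List Char) :
    ∀ (done : List Char) (acc : Option (Int × Char)), GoodB lw done acc →
      GoodB lw (done ++ vs) (vs.foldl (pvStep lw) acc) := by
  induction vs with
  | nil => intro done acc h; simpa using h
  | cons v rest ih =>
      intro done acc h
      simp only [List.foldl_cons]
      have h2 := ih (done ++ [v]) _ (good_step lw done acc v h)
      have e : done ++ [v] ++ rest = done ++ v :: rest := by simp
      rwa [e] at h2

lemma zip_len (lw : List Char) : (lw.zip lw.tail).length = lw.length - 1 := by
  simp [List.length_zip, List.length_tail]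

lemma main_word (lw : List Char) :
    pvAInner lw none = (pvBBest lw).map (fun b => b.2) := by
  rw [aInner_none]
  have hG : GoodB lw (['a','e','i','o','u'] : List Char) (pvBBest lw) := by
    have := fold_good lw ['a','e','i','o','u'] [] none (by intro w hw; simp at hw)
    rw [pvBBest_eq]
    simpa using this
  cases hb : pvBBest lw with
  | none =>
      rw [hb] at hG
      simp only [Option.map_none]
      unfold pvFirstDouble
      rw [List.find?_eq_none.2, Option.map_none]
      intro x hx hp
      obtain ⟨k, hk, hxe⟩ := List.getElem_of_mem hx
      have hk1 : k + 1 < lw.length := by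
        have := zip_len lw; omega
      rw [List.getElem_zip] at hxe
      simp only [Bool.and_eq_true, beq_iff_eq] at hp
      obtain ⟨heq, hvw⟩ := hp
      have hx1 : lw[k] = x.1 := by rw [← hxe]
      have hx2 : lw[k+1] = x.1 := by
        have : lw.tail[k]'(by simp [List.length_tail]; omega) = x.2 := by rw [← hxe]
        rw [List.getElem_tail] at this
        rw [this, ← heq]
      have hpre : [x.1, x.1] <+: lw.drop k := (db_prefix_iff lw x.1 k).2 ⟨hk1, hx1, hx2⟩
      have hne := (find_le lw [x.1, x.1] k hpre).1
      have hcv : x.1 ∈ (['a','e','i','o','u'] : List Char) := by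
        simpa [pvVowels, List.contains_iff_mem] using hvw
      exact hne (hG x.1 hcv)
  | some b =>
      rw [hb] at hG
      obtain ⟨hmem, hfind, hne, hall⟩ := hG
      obtain ⟨hpos, hpre, hmin⟩ := find_spec lw [b.2, b.2] (hfind ▸ hne)
      rw [hfind] at hpos hpre hmin
      obtain ⟨hjl, hj1, hj2⟩ := (db_prefix_iff lw b.2 b.1.toNat).1 hpre
      simp only [Option.map_some]
      unfold pvFirstDouble
      have hzl : b.1.toNat < (lw.zip lw.tail).length := by
        have := zip_len lw; omega
      have hfq : (lw.zip lw.tail).find? (fun p => p.1 == p.2 && pvVowels.contains p.1)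
          = some (b.2, b.2) := by
        rw [List.find?_eq_some_iff_getElem]
        refine ⟨?_, b.1.toNat, hzl, ?_, ?_⟩
        · simp
          exact hmem
        · rw [List.getElem_zip, List.getElem_tail, hj1, hj2]
        · intro m hm
          have hm1 : m + 1 < lw.length := by have := zip_len lw; omega
          have key : ¬ (lw[m] = lw[m+1] ∧ lw[m] ∈ pvVowels) := by
            rintro ⟨he, hv⟩
            have hpre' : [lw[m], lw[m]] <+: lw.drop m :=
              (db_prefix_iff lw _ m).2 ⟨hm1, rfl, he.symm⟩
            obtain ⟨hne', hle'⟩ := find_le lw [lw[m], lw[m]] m hpre'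
            have hv' : lw[m] ∈ (['a','e','i','o','u'] : List Char) := hv
            rcases hall _ hv' with h1 | h1
            · exact hne' h1
            · have hble : b.1 ≤ (m : Int) := le_trans h1 hle'
              omega
          simp only [List.getElem_zip, List.getElem_tail, Bool.not_eq_eq_eq_not, Bool.not_true,
            Bool.and_eq_false_iff, beq_eq_false_iff_ne, ne_eq]
          by_contra hcon
          push_neg at hcon
          rcases hcon with ⟨hq1, hq2⟩
          exact key ⟨hq1, by simpa [List.contains_iff_mem] using hq2⟩
      rw [hfq]
      rfl
-- ===== VERDICT (by name: the statement is the Claim_ definition above) =====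
theorem find_double_vowel_words_spec : Claim_equal_find_double_vowel_words := by
  intro words _
  unfold Spec_find_double_vowel_words find_double_vowel_words find_double_vowel_words_alt
  congr 2
  funext d w
  rw [main_word]
  cases pvBBest (PySem.Str.lower w).toList <;> rfl
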